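-- pv_equiv track=rewrite | github.com/NukerDucker/01276121_Computer_Programming | Chapter_8/old/ch8_5_old.py | square_num
-- ===== SOURCE A (Python) =====
-- def num_generator(num_range):
--     num_str = ''
--     num = 1
--     for _ in range(1, num_range + 1):
--         if num == 10:
--             num = 0
--         num_str += f'{num}'
--         num += 1
--     return num_str
--
-- def square_num(h):
--     num_str = num_generator(h)
--     output = ''
--     for i in range(len(num_str)):
--         output += f'{num_str[:i] + num_str[i] * (h - i)}'
--         if i < len(num_str) - 1:
--             output += '\n'
--     return output
-- ===== SOURCE B (Python) =====
-- def square_num(h):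
--     lines = []
--     prefix = ''
--     for i in range(h):
--         d = str((i + 1) % 10)
--         lines.append(prefix + d * (h - i))
--         prefix += d
--     return '\n'.join(lines)
-- ===== Notes on version B (the rewrite author's own statement) =====
-- stated objective: simpler
-- what changed: Drops the num_generator precomputation and the per-line slicing of the digit string: a single pass maintains an incremental prefix, computes each digit directly by modular arithmetic, collects lines in a list and joins them with newlines.
import Mathlib
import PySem

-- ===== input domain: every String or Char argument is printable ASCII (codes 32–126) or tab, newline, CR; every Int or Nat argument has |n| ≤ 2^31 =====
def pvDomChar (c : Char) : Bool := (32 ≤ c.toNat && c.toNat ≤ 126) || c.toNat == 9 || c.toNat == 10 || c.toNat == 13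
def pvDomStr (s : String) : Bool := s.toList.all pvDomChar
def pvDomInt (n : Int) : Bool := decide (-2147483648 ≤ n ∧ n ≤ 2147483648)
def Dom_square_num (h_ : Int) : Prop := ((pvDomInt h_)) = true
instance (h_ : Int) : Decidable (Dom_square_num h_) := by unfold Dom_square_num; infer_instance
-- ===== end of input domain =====

-- B drops A's num_generator precomputation and per-line slicing: one incremental
-- pass keeps the growing prefix and computes each digit by the closed form (i+1)%10;
-- objective: simpler.

-- ===== PORT A =====
-- helper num_generator, ported over List Char (wrapped to String at the end of square_num)
def numGenerator (num_range : Int) : List Char :=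
  ((PySem.List.pyRange 1 (num_range + 1) 1).foldl
    (fun (st : List Char × Int) _ =>
      let num := if st.2 = 10 then 0 else st.2
      (st.1 ++ PySem.Int.toChars num, num + 1)) ([], 1)).1

def square_num (h_ : Int) : String :=
  let num_str := numGenerator h_
  let out := (PySem.List.pyRange 0 (PySem.List.len num_str) 1).foldl
    (fun (output : List Char) i =>
      let output := output ++
        (PySem.List.slice num_str none (some i) ++
          PySem.List.pyRepeat [PySem.List.pyGetD num_str i ' '] (h_ - i))
      if i < PySem.List.len num_str - 1 then output ++ ['\n'] else output) []
  String.ofList out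

-- ===== PORT B =====
def square_num_alt (h_ : Int) : String :=
  let st := (PySem.List.pyRange 0 h_ 1).foldl
    (fun (st : List (List Char) × List Char) i =>
      let d := PySem.Int.toChars (PySem.Int.mod (i + 1) 10)
      (st.1 ++ [st.2 ++ PySem.List.pyRepeat d (h_ - i)], st.2 ++ d)) ([], [])
  String.ofList (PySem.Chars.join ['\n'] st.1)

-- ===== PRECONDITION & SPEC =====
def Spec_square_num (h_ : Int) (out : String) : Prop := out = square_num_alt h_
instance (h_ : Int) (out : String) : Decidable (Spec_square_num h_ out) := by unfold Spec_square_num; infer_instance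

-- ===== CLAIM (what is proved, stated in full; the proofs are below) =====
def Claim_equal_square_num : Prop := ∀ (h_ : Int), Dom_square_num h_ → Spec_square_num h_ (square_num h_)

-- ===== LEMMAS AND PROOFS =====

-- the digit written on step k (0-based): (k+1) % 10 as a character
def digc (k : Nat) : Char := Char.ofNat (48 + (k + 1) % 10)

-- line i of the pattern of height n
def lineB (n i : Nat) : List Char :=
  (List.range i).map digc ++ List.replicate (n - i) (digc i)

-- separator-interleaved concatenation: every element but the last followed by sep
def sepcat (sep : List Char) : List (List Char) → List Char
  | [] => []
  | [a] => a
  | a :: b :: rest => a ++ sep ++ sepcat sep (b :: rest)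

theorem toChars_digit (j : Nat) (hj : j < 10) :
    PySem.Int.toChars (j : Int) = [Char.ofNat (48 + j)] := by
  interval_cases j <;> rfl

theorem mod_cast_ten (j : Nat) :
    PySem.Int.mod ((j : Int) + 1) 10 = (((j + 1) % 10 : Nat) : Int) := by
  simp [PySem.Int.mod, Int.fmod_eq_emod]

theorem foldl_const {α β : Type} (g : α → α) (l : List β) (init : α) :
    l.foldl (fun st _ => g st) init = g^[l.length] init := by
  induction l generalizing init with
  | nil => rfl
  | cons a t ih => simp [List.foldl_cons, ih, Function.iterate_succ_apply]

theorem gen_iter (k : Nat) :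
    (fun (st : List Char × Int) =>
      let num := if st.2 = 10 then 0 else st.2
      (st.1 ++ PySem.Int.toChars num, num + 1))^[k] (([] : List Char), (1 : Int))
    = ((List.range k).map digc, ((k % 10 : Nat) : Int) + 1) := by
  induction k with
  | zero => rfl
  | succ k ih =>
    rw [Function.iterate_succ_apply', ih]
    have hnum : (if (((k % 10 : Nat) : Int) + 1) = 10 then (0:Int) else ((k % 10 : Nat) : Int) + 1)
        = (((k + 1) % 10 : Nat) : Int) := by
      by_cases h9 : k % 10 = 9 <;> simp [h9] <;> omega
    simp only [hnum]
    rw [toChars_digit ((k + 1) % 10) (Nat.mod_lt _ (by norm_num))]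
    have hr : List.map digc (List.range (k + 1)) = List.map digc (List.range k) ++ [digc k] := by
      rw [List.range_succ, List.map_append]; rfl
    rw [hr]; rfl

theorem numGenerator_eq (h_ : Int) (n : Nat) (hn : (h_ + 1 - 1).toNat = n) :
    numGenerator h_ = (List.range n).map digc := by
  unfold numGenerator
  rw [foldl_const, PySem.List.length_pyRange_one]
  rw [show h_ + 1 - 1 = h_ by ring] at hn ⊢
  rw [hn, gen_iter]

theorem join_eq_sepcat (sep : List Char) (ls : List (List Char)) :
    PySem.Chars.join sep ls = sepcat sep ls := by
  induction ls with
  | nil => simp [PySem.Chars.join_nil, sepcat]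
  | cons a t ih =>
    cases t with
    | nil => simp [PySem.Chars.join_singleton, sepcat]
    | cons b r => rw [PySem.Chars.join_cons_cons, sepcat, ih]

theorem sepcat_range (sep : List Char) (L : Nat → List Char) (m : Nat) :
    sepcat sep ((List.range (m + 1)).map L) =
      ((List.range m).map (fun i => L i ++ sep)).flatten ++ L m := by
  induction m generalizing L with
  | zero => simp [sepcat]
  | succ m ih =>
    have h1 : List.range (m + 2) = 0 :: (List.range (m + 1)).map Nat.succ :=
      List.range_succ_eq_map
    have h2 : List.range (m + 1) = 0 :: (List.range m).map Nat.succ :=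
      List.range_succ_eq_map
    rw [h1, List.map_cons, List.map_map]
    have hmap : (List.range (m + 1)).map (L ∘ Nat.succ)
        = (List.range (m + 1)).map (fun i => L (i + 1)) := by
      apply List.map_congr_left; intro x _; rfl
    rw [hmap]
    cases hR : (List.range (m + 1)).map (fun i => L (i + 1)) with
    | nil => simp at hR
    | cons c cs =>
      rw [sepcat, ← hR, ih (fun i => L (i + 1))]
      have hmap' : (List.range m).map ((fun i => L i ++ sep) ∘ Nat.succ)
          = (List.range m).map (fun i => L (i + 1) ++ sep) := by
        apply List.map_congr_left; intro x _; rfl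
      conv_rhs => rw [h2, List.map_cons, List.map_map, hmap']
      simp [List.append_assoc]

theorem alt_fold (h_ : Int) (n : Nat) (hn : h_.toNat = n) (hge : 0 ≤ h_) (k : Nat) (hk : k ≤ n) :
    ((List.range k).map (fun j : Nat => (0 : Int) + j)).foldl
      (fun (st : List (List Char) × List Char) i =>
        let d := PySem.Int.toChars (PySem.Int.mod (i + 1) 10)
        (st.1 ++ [st.2 ++ PySem.List.pyRepeat d (h_ - i)], st.2 ++ d)) ([], [])
    = ((List.range k).map (lineB n), (List.range k).map digc) := by
  induction k with
  | zero => rfl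
  | succ k ih =>
    rw [List.range_succ, List.map_append, List.foldl_append, ih (Nat.le_of_succ_le hk)]
    simp only [List.map_cons, List.map_nil, List.foldl_cons, List.foldl_nil, zero_add]
    rw [mod_cast_ten, toChars_digit _ (Nat.mod_lt _ (by norm_num))]
    have hrep : PySem.List.pyRepeat [Char.ofNat (48 + (k + 1) % 10)] (h_ - (k : Int))
        = List.replicate (n - k) (digc k) := by
      rw [PySem.List.pyRepeat_singleton]
      have ht : (h_ - (k : Int)).toNat = n - k := by omega
      rw [ht]; rfl
    rw [hrep]
    simp [List.map_append, lineB, digc]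

theorem square_num_alt_eq (h_ : Int) (n : Nat) (hn : h_.toNat = n) (hge : 0 ≤ h_) :
    square_num_alt h_ = String.ofList (PySem.Chars.join ['\n'] ((List.range n).map (lineB n))) := by
  unfold square_num_alt
  rw [PySem.List.pyRange_one]
  have hx : (h_ - 0).toNat = n := by omega
  rw [hx, alt_fold h_ n hn hge n le_rfl]

theorem a_fold (h_ : Int) (n : Nat) (hn : h_.toNat = n) (hge : 0 ≤ h_) (k : Nat) (hk : k ≤ n) :
    ((List.range k).map (fun j : Nat => (0 : Int) + j)).foldl
      (fun (output : List Char) i =>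
        let output := output ++
          (PySem.List.slice ((List.range n).map digc) none (some i) ++
            PySem.List.pyRepeat [PySem.List.pyGetD ((List.range n).map digc) i ' '] (h_ - i))
        if i < PySem.List.len ((List.range n).map digc) - 1 then output ++ ['\n'] else output) []
    = ((List.range k).map (fun i => lineB n i ++ if i + 1 < n then ['\n'] else [])).flatten := by
  induction k with
  | zero => rfl
  | succ k ih =>
    rw [List.range_succ, List.map_append, List.foldl_append, ih (Nat.le_of_succ_le hk)]
    simp only [List.map_cons, List.map_nil, List.foldl_cons, List.foldl_nil, zero_add]
    have hkn : k < n := hk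
    have hslice : PySem.List.slice ((List.range n).map digc) none (some (k : Int))
        = (List.range k).map digc := by
      rw [PySem.List.slice_to_natCast, ← List.map_take, List.take_range]
      congr 2
      omega
    have hget : PySem.List.pyGetD ((List.range n).map digc) (k : Int) ' ' = digc k := by
      simp [PySem.List.pyGetD_natCast, List.getD_eq_getElem?_getD, hkn, digc]
    have hrep : PySem.List.pyRepeat [digc k] (h_ - (k : Int)) = List.replicate (n - k) (digc k) := by
      rw [PySem.List.pyRepeat_singleton]
      congr 1
      omega
    rw [hslice, hget, hrep]
    simp only [PySem.List.len_eq, List.length_map, List.length_range]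
    rw [List.map_append, List.flatten_append]
    simp only [List.map_cons, List.map_nil, List.flatten_cons, List.flatten_nil, List.append_nil]
    by_cases hc : k + 1 < n
    · rw [if_pos (by omega : (k : Int) < (n : Int) - 1), if_pos hc]
      simp [lineB, List.append_assoc]
    · rw [if_neg (by omega : ¬ (k : Int) < (n : Int) - 1), if_neg hc]
      simp [lineB, List.append_assoc]

theorem square_num_eq (h_ : Int) (n : Nat) (hpos : 0 < n) (hn : h_.toNat = n) (hge : 0 ≤ h_) :
    square_num h_ = String.ofList (sepcat ['\n'] ((List.range n).map (lineB n))) := by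
  unfold square_num
  dsimp only
  rw [numGenerator_eq h_ n (by omega)]
  rw [show PySem.List.pyRange 0 (PySem.List.len ((List.range n).map digc)) 1
      = (List.range n).map (fun j : Nat => (0 : Int) + j) from by
    simp only [PySem.List.len_eq, List.length_map, List.length_range]
    rw [PySem.List.pyRange_one]
    simp]
  rw [a_fold h_ n hn hge n le_rfl]
  obtain ⟨m, rfl⟩ : ∃ m, n = m + 1 := ⟨n - 1, by omega⟩
  rw [sepcat_range]
  congr 1
  rw [List.range_succ, List.map_append, List.flatten_append]
  simp only [List.map_cons, List.map_nil, List.flatten_cons, List.flatten_nil, List.append_nil]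
  rw [if_neg (by omega : ¬ m + 1 < m + 1), List.append_nil]
  congr 1
  apply congrArg
  apply List.map_congr_left
  intro x hx
  rw [if_pos (by simp at hx; omega)]

-- ===== VERDICT (by name: the statement is the Claim_ definition above) =====
theorem square_num_spec : Claim_equal_square_num := by
  intro h_ _
  unfold Spec_square_num
  by_cases hpos : 0 < h_
  · rw [square_num_eq h_ h_.toNat (by omega) rfl (le_of_lt hpos),
        square_num_alt_eq h_ h_.toNat rfl (le_of_lt hpos), join_eq_sepcat]
  · have e1 : PySem.List.pyRange 1 (h_ + 1) 1 = [] := PySem.List.pyRange_one_eq_nil (by omega)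
    have e2 : PySem.List.pyRange 0 h_ 1 = [] := PySem.List.pyRange_one_eq_nil (by omega)
    unfold square_num square_num_alt numGenerator
    rw [e1, e2]
    rfl
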